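-- pv_equiv track=rewrite | github.com/binshengliu/irtools | rm3.py | parse_rmodel
-- ===== SOURCE A (Python) =====
-- from collections import OrderedDict
--
-- def pairwise(iterable):
--     "s -> (s0, s1), (s2, s3), (s4, s5), ..."
--     a = iter(iterable)
--     return zip(a, a)
--
-- def parse_rmodel(output):
--     output = [line.strip() for line in output.splitlines()]
--     byquery = [i for i, l in enumerate(output) if l.startswith('#')]
--     rms = OrderedDict()
--     for begin, end in pairwise(byquery):
--         _, _, qno, *_ = output[begin].split()
--         rm = output[begin + 1:end]
--         rms[qno] = rm
--     return rms
-- ===== SOURCE B (Python) =====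
-- from collections import OrderedDict
--
--
-- def parse_rmodel(output):
--     rms = OrderedDict()
--     current = None  # (header line, lines of the open block)
--     for line in output.splitlines():
--         line = line.strip()
--         if line.startswith('#'):
--             if current is None:
--                 current = (line, [])
--             else:
--                 header, block = current
--                 _, _, qno, *_ = header.split()
--                 rms[qno] = block
--                 current = None
--         elif current is not None:
--             current[1].append(line)
--     return rms
-- ===== Notes on version B (the rewrite author's own statement) =====
-- stated objective: simpler
-- what changed: Replaced the collect-all-#-indices-then-pairwise-zip-and-slice approach with a single linear pass over the lines that toggles an open/closed block state, appending body lines to the current block and emitting it when the closing # line arrives.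
import Mathlib
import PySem

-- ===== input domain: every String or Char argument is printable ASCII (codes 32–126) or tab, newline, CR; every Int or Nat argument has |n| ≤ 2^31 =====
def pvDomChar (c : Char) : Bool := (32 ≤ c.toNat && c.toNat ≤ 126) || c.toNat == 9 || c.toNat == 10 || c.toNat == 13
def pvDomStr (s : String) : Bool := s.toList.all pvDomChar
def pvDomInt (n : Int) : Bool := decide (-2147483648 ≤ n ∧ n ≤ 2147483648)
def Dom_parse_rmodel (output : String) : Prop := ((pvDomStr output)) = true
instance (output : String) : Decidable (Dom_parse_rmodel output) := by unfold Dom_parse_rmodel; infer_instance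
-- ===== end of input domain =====

set_option maxHeartbeats 1000000

-- B replaces A's collect-#-indices / pairwise-zip / slice decomposition by a single pass with an
-- open/closed block state (objective: simpler, one linear pass, no index bookkeeping).

-- ===== PORT A =====
-- `pairwise(it)`: consecutive non-overlapping pairs (s0,s1),(s2,s3),…; a trailing odd element is dropped
def pvPairwise {α : Type} : List α → List (α × α)
  | a :: b :: rest => (a, b) :: pvPairwise rest
  | _ => []

def parse_rmodel (output : String) : List (String × List String) :=
  let lines := (PySem.Str.splitlines output).map PySem.Str.strip
  let byquery := ((PySem.List.enumerate lines 0).filter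
      (fun p => PySem.Str.startswith p.2 "#")).map (·.1)
  let rms := (pvPairwise byquery).foldl
    (fun rms be =>
      -- `_, _, qno, *_ = output[begin].split()`: on < 3 tokens Python raises ValueError,
      -- excluded by Pre_parse_rmodel; `output[begin]` is always in range (begin is an enumerate index)
      match PySem.Str.split₀ (PySem.List.pyGetD lines be.1 "") with
      | _ :: _ :: qno :: _ =>
          rms.insert qno (PySem.List.slice lines (some (be.1 + 1)) (some be.2))
      | _ => rms)
    (PySem.Dict.empty : PySem.Dict String (List String))
  rms.items

-- ===== PORT B =====
-- one step of B's loop body, applied to the already-stripped line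
def pvCore (st : PySem.Dict String (List String) × Option (String × List String))
    (line : String) : PySem.Dict String (List String) × Option (String × List String) :=
  if PySem.Str.startswith line "#" then
    match st.2 with
    | none => (st.1, some (line, []))
    | some (header, block) =>
      -- `_, _, qno, *_ = header.split()`: on < 3 tokens Python raises ValueError, excluded by Pre_
      match PySem.Str.split₀ header with
      | _ :: _ :: qno :: _ => (st.1.insert qno block, none)
      | _ => (st.1, none)
  else
    match st.2 with
    | none => st
    | some (header, block) => (st.1, some (header, block ++ [line]))

-- B's loop body: `line = line.strip()` then the open/close step
def pvStepB (st : PySem.Dict String (List String) × Option (String × List String))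
    (raw : String) : PySem.Dict String (List String) × Option (String × List String) :=
  pvCore st (PySem.Str.strip raw)

def parse_rmodel_alt (output : String) : List (String × List String) :=
  (((PySem.Str.splitlines output).foldl pvStepB
    ((PySem.Dict.empty : PySem.Dict String (List String)), none)).1).items

-- ===== PRECONDITION & SPEC =====
-- Pre_ excludes exactly the inputs where Python A raises ValueError: some paired opening
-- `#` header line (an even-indexed `#` line that is closed by a later `#` line) splits
-- into fewer than 3 whitespace-separated tokens. B raises ValueError on the same inputs.
def Pre_parse_rmodel (output : String) : Prop :=
  ∀ i ∈ List.range ((((PySem.Str.splitlines output).map PySem.Str.strip).filter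
      (fun l => PySem.Str.startswith l "#")).length / 2),
    3 ≤ (PySem.Str.split₀ ((((PySem.Str.splitlines output).map PySem.Str.strip).filter
      (fun l => PySem.Str.startswith l "#")).getD (2 * i) "")).length
instance (output : String) : Decidable (Pre_parse_rmodel output) := by
  unfold Pre_parse_rmodel; infer_instance

def pvWitness_parse_rmodel : String := "# rm 7\nw1 0.5\nw2 0.25\n# end"

def Spec_parse_rmodel (output : String) (out : List (String × List String)) : Prop := out = parse_rmodel_alt output
instance (output : String) (out : List (String × List String)) : Decidable (Spec_parse_rmodel output out) := by unfold Spec_parse_rmodel; infer_instance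

-- ===== CLAIM (what is proved, stated in full; the proofs are below) =====
def Claim_equal_parse_rmodel : Prop := ∀ (output : String), Dom_parse_rmodel output → Pre_parse_rmodel output → Spec_parse_rmodel output (parse_rmodel output)

-- ===== LEMMAS AND PROOFS =====

-- inserting a block under a header line (the shared close step of both ports)
def pvIns (d : PySem.Dict String (List String)) (h : String) (blk : List String) :
    PySem.Dict String (List String) :=
  match PySem.Str.split₀ h with
  | _ :: _ :: qno :: _ => d.insert qno blk
  | _ => d

-- positions (from 0) of the `#` lines
def pvIdx : List String → List Nat
  | [] => []
  | l :: t => if PySem.Str.startswith l "#" then 0 :: (pvIdx t).map (· + 1)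
              else (pvIdx t).map (· + 1)

-- the (header, body) pairs A reads off a list of lines from the list of header positions
def pvPairsFrom (ls : List String) (is : List Nat) : List (String × List String) :=
  (pvPairwise is).map (fun p => (ls.getD p.1 "", (ls.drop (p.1 + 1)).take (p.2 - (p.1 + 1))))

theorem pvPairwise_map {α β : Type} (f : α → β) :
    (l : List α) → pvPairwise (l.map f) = (pvPairwise l).map (fun p => (f p.1, f p.2))
  | [] => rfl
  | [_] => rfl
  | a :: b :: r => by simp [pvPairwise, pvPairwise_map f r]

theorem pvIdx_enum : ∀ (ls : List String) (s : Int),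
    (((PySem.List.enumerate ls s).filter (fun p => PySem.Str.startswith p.2 "#")).map (·.1))
      = (pvIdx ls).map (fun n : Nat => s + (n : Int))
  | [], _ => by simp [PySem.List.enumerate_nil, pvIdx]
  | l :: t, s => by
    rw [PySem.List.enumerate_cons]
    by_cases h : PySem.Str.startswith l "#" = true
    · rw [List.filter_cons_of_pos (by simpa using h), List.map_cons, pvIdx_enum t (s + 1)]
      simp only [pvIdx]
      rw [if_pos h]
      simp only [List.map_cons, List.map_map, List.cons.injEq]
      refine ⟨by simp, List.map_congr_left fun n _ => ?_⟩
      simp only [Function.comp_apply]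
      push_cast
      ring
    · rw [List.filter_cons_of_neg (by simpa using h), pvIdx_enum t (s + 1)]
      simp only [pvIdx]
      rw [if_neg h, List.map_map]
      refine List.map_congr_left fun n _ => ?_
      simp only [Function.comp_apply]
      push_cast
      ring

theorem pvIdx_nil_of : ∀ (ls : List String),
    (∀ l ∈ ls, PySem.Str.startswith l "#" = false) → pvIdx ls = []
  | [], _ => rfl
  | l :: t, h => by
    simp only [pvIdx]
    rw [if_neg (by rw [h l (by simp)]; simp),
      pvIdx_nil_of t (fun x hx => h x (by simp [hx]))]
    rfl

theorem pvIdx_prefix : ∀ (pre : List String),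
    (∀ l ∈ pre, PySem.Str.startswith l "#" = false) → ∀ r,
    pvIdx (pre ++ r) = (pvIdx r).map (· + pre.length)
  | [], _, r => by simp
  | x :: pre, h, r => by
    simp only [List.cons_append, pvIdx]
    rw [if_neg (by rw [h x (by simp)]; simp),
      pvIdx_prefix pre (fun l hl => h l (by simp [hl])) r, List.map_map]
    refine List.map_congr_left fun n _ => ?_
    simp only [Function.comp_apply, List.length_cons]
    omega

theorem pvPairsFrom_shift (pre ls : List String) (is : List Nat) :
    pvPairsFrom (pre ++ ls) (is.map (· + pre.length)) = pvPairsFrom ls is := by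
  unfold pvPairsFrom
  rw [pvPairwise_map, List.map_map]
  refine List.map_congr_left fun p _ => ?_
  simp only [Function.comp_apply]
  have h1 : (pre ++ ls).getD (p.1 + pre.length) "" = ls.getD p.1 "" := by
    rw [List.getD_eq_getElem?_getD, List.getD_eq_getElem?_getD,
      List.getElem?_append_right (by omega),
      show p.1 + pre.length - pre.length = p.1 by omega]
  have h2 : (pre ++ ls).drop (p.1 + pre.length + 1) = ls.drop (p.1 + 1) := by
    rw [show p.1 + pre.length + 1 = pre.length + (p.1 + 1) by omega]
    simp [List.drop_append]
  have h3 : p.2 + pre.length - (p.1 + pre.length + 1) = p.2 - (p.1 + 1) := by omega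
  rw [h1, h2, h3]

theorem pvCore_skip (st : PySem.Dict String (List String)) (x : String)
    (hx : PySem.Str.startswith x "#" = false) : pvCore (st, none) x = (st, none) := by
  unfold pvCore
  rw [if_neg (by rw [hx]; simp)]

theorem pvCore_open (st : PySem.Dict String (List String)) (x : String)
    (hx : PySem.Str.startswith x "#" = true) : pvCore (st, none) x = (st, some (x, [])) := by
  unfold pvCore
  rw [if_pos hx]

theorem pvCore_collect (st : PySem.Dict String (List String)) (h : String) (blk : List String)
    (x : String) (hx : PySem.Str.startswith x "#" = false) :
    pvCore (st, some (h, blk)) x = (st, some (h, blk ++ [x])) := by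
  unfold pvCore
  rw [if_neg (by rw [hx]; simp)]

theorem pvCore_close (d : PySem.Dict String (List String)) (h : String) (blk : List String)
    (c : String) (hc : PySem.Str.startswith c "#" = true) :
    pvCore (d, some (h, blk)) c = (pvIns d h blk, none) := by
  cases hs : PySem.Str.split₀ h with
  | nil => simp only [pvCore, pvIns, hs, if_pos hc]
  | cons a r =>
    cases r with
    | nil => simp only [pvCore, pvIns, hs, if_pos hc]
    | cons b r2 => cases r2 <;> simp only [pvCore, pvIns, hs, if_pos hc]

theorem pvFold_skip (d : PySem.Dict String (List String)) :
    ∀ (pre : List String), (∀ l ∈ pre, PySem.Str.startswith l "#" = false) →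
    ∀ r : List String, (pre ++ r).foldl pvCore (d, none) = r.foldl pvCore (d, none)
  | [], _, r => rfl
  | x :: pre, hp, r => by
    simp only [List.cons_append, List.foldl_cons, pvCore_skip d x (hp x (by simp))]
    exact pvFold_skip d pre (fun l hl => hp l (by simp [hl])) r

theorem pvFold_collect (d : PySem.Dict String (List String)) (h : String) :
    ∀ (pre : List String), (∀ l ∈ pre, PySem.Str.startswith l "#" = false) →
    ∀ (blk : List String) (r : List String),
    (pre ++ r).foldl pvCore (d, some (h, blk)) = r.foldl pvCore (d, some (h, blk ++ pre))
  | [], _, blk, r => by simp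
  | x :: pre, hp, blk, r => by
    simp only [List.cons_append, List.foldl_cons, pvCore_collect d h blk x (hp x (by simp))]
    rw [pvFold_collect d h pre (fun l hl => hp l (by simp [hl])) (blk ++ [x]) r]
    simp only [List.append_assoc, List.singleton_append]

theorem pvDropWhile_cons_prop {α : Type} (p : α → Bool) :
    ∀ (l : List α) (x : α) (t : List α), l.dropWhile p = x :: t → p x = false
  | [], x, t, h => by simp [List.dropWhile] at h
  | a :: l, x, t, h => by
    by_cases hpa : p a = true
    · rw [List.dropWhile_cons_of_pos hpa] at h
      exact pvDropWhile_cons_prop p l x t h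
    · rw [List.dropWhile_cons_of_neg hpa] at h
      cases h
      simpa using hpa

theorem pvMain : ∀ (n : Nat) (ls : List String), ls.length ≤ n →
    ∀ d : PySem.Dict String (List String),
    (ls.foldl pvCore (d, none)).1
      = (pvPairsFrom ls (pvIdx ls)).foldl (fun d p => pvIns d p.1 p.2) d := by
  intro n
  induction n with
  | zero =>
    intro ls hls d
    rw [List.length_eq_zero_iff.mp (Nat.le_zero.mp hls)]
    rfl
  | succ n ih =>
    intro ls hls d
    have hsplit : ls.takeWhile (fun l => !PySem.Str.startswith l "#")
        ++ ls.dropWhile (fun l => !PySem.Str.startswith l "#") = ls :=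
      List.takeWhile_append_dropWhile
    set pre := ls.takeWhile (fun l => !PySem.Str.startswith l "#") with hpre_def
    have hpre : ∀ l ∈ pre, PySem.Str.startswith l "#" = false := by
      intro l hl
      simpa using List.mem_takeWhile_imp hl
    cases hrest : ls.dropWhile (fun l => !PySem.Str.startswith l "#") with
    | nil =>
      rw [hrest, List.append_nil] at hsplit
      have hidx : pvIdx ls = [] := by
        rw [← hsplit]
        exact pvIdx_nil_of pre hpre
      have hL : ls.foldl pvCore (d, none) = (d, none) := by
        conv_lhs => rw [← hsplit, show pre = pre ++ ([] : List String) by simp]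
        rw [pvFold_skip d pre hpre]
        rfl
      rw [hL, hidx]
      rfl
    | cons h t =>
      have hPh : PySem.Str.startswith h "#" = true := by
        simpa using pvDropWhile_cons_prop _ ls h t hrest
      rw [hrest] at hsplit
      have hL : ls.foldl pvCore (d, none) = t.foldl pvCore (d, some (h, [])) := by
        conv_lhs => rw [← hsplit]
        rw [pvFold_skip d pre hpre, List.foldl_cons, pvCore_open d h hPh]
      rw [hL]
      have hsplit2 : t.takeWhile (fun l => !PySem.Str.startswith l "#")
          ++ t.dropWhile (fun l => !PySem.Str.startswith l "#") = t :=
        List.takeWhile_append_dropWhile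
      set pre2 := t.takeWhile (fun l => !PySem.Str.startswith l "#") with hpre2_def
      have hpre2 : ∀ l ∈ pre2, PySem.Str.startswith l "#" = false := by
        intro l hl
        simpa using List.mem_takeWhile_imp hl
      cases hrest2 : t.dropWhile (fun l => !PySem.Str.startswith l "#") with
      | nil =>
        rw [hrest2, List.append_nil] at hsplit2
        have hidxt : pvIdx t = [] := by
          rw [← hsplit2]
          exact pvIdx_nil_of pre2 hpre2
        have hidx : pvIdx ls = [pre.length] := by
          conv_lhs => rw [← hsplit]
          rw [pvIdx_prefix pre hpre]
          simp only [pvIdx]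
          rw [if_pos hPh, hidxt]
          simp
        have hL2 : t.foldl pvCore (d, some (h, [])) = (d, some (h, pre2)) := by
          conv_lhs => rw [← hsplit2, show pre2 = pre2 ++ ([] : List String) by simp]
          rw [pvFold_collect d h pre2 hpre2 [] []]
          rfl
        rw [hL2, hidx]
        rfl
      | cons c t3 =>
        have hPc : PySem.Str.startswith c "#" = true := by
          simpa using pvDropWhile_cons_prop _ t c t3 hrest2
        rw [hrest2] at hsplit2
        have ht3 : t3.length ≤ n := by
          have h1 : ls.length = pre.length + 1 + t.length := by
            conv_lhs => rw [← hsplit]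
            simp only [List.length_append, List.length_cons]
            omega
          have h2 : t.length = pre2.length + 1 + t3.length := by
            conv_lhs => rw [← hsplit2]
            simp only [List.length_append, List.length_cons]
            omega
          omega
        have hL2 : t.foldl pvCore (d, some (h, []))
            = t3.foldl pvCore (pvIns d h pre2, none) := by
          conv_lhs => rw [← hsplit2]
          rw [pvFold_collect d h pre2 hpre2 [] (c :: t3), List.foldl_cons, List.nil_append,
            pvCore_close d h pre2 c hPc]
        rw [hL2, ih t3 ht3 (pvIns d h pre2)]
        have hidxt : pvIdx t = pre2.length :: (pvIdx t3).map (· + (pre2.length + 1)) := by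
          conv_lhs => rw [← hsplit2]
          rw [pvIdx_prefix pre2 hpre2]
          simp only [pvIdx]
          rw [if_pos hPc]
          simp only [List.map_cons, List.map_map, List.cons.injEq]
          refine ⟨by omega, List.map_congr_left fun m _ => ?_⟩
          simp only [Function.comp_apply]
          omega
        have hidx : pvIdx ls = pre.length :: (pre.length + 1 + pre2.length)
            :: (pvIdx t3).map (· + (pre.length + 1 + pre2.length + 1)) := by
          conv_lhs => rw [← hsplit]
          rw [pvIdx_prefix pre hpre]
          simp only [pvIdx]
          rw [if_pos hPh, hidxt]
          simp only [List.map_cons, List.map_map, List.cons.injEq]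
          refine ⟨by omega, by omega, List.map_congr_left fun m _ => ?_⟩
          simp only [Function.comp_apply]
          omega
        rw [hidx]
        have hhead1 : ls.getD pre.length "" = h := by
          rw [← hsplit, List.getD_eq_getElem?_getD,
            List.getElem?_append_right (Nat.le_refl pre.length)]
          simp
        have hhead2 : (ls.drop (pre.length + 1)).take
            (pre.length + 1 + pre2.length - (pre.length + 1)) = pre2 := by
          have hd : ls.drop (pre.length + 1) = t := by
            conv_lhs => rw [← hsplit]
            simp [List.drop_append]
          rw [hd, show pre.length + 1 + pre2.length - (pre.length + 1) = pre2.length by omega,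
            ← hsplit2]
          exact List.take_left
        have htail : pvPairsFrom ls
            ((pvIdx t3).map (· + (pre.length + 1 + pre2.length + 1)))
            = pvPairsFrom t3 (pvIdx t3) := by
          have hls2 : ls = (pre ++ h :: (pre2 ++ [c])) ++ t3 := by
            rw [← hsplit, ← hsplit2]
            simp
          have hlen : pre.length + 1 + pre2.length + 1
              = (pre ++ h :: (pre2 ++ [c])).length := by
            simp only [List.length_append, List.length_cons, List.length_nil]
            omega
          conv_lhs => rw [hls2, hlen]
          rw [pvPairsFrom_shift]
        have hpeel : pvPairsFrom ls (pre.length :: (pre.length + 1 + pre2.length)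
            :: (pvIdx t3).map (· + (pre.length + 1 + pre2.length + 1)))
            = (h, pre2) :: pvPairsFrom t3 (pvIdx t3) := by
          rw [← htail]
          unfold pvPairsFrom
          rw [show pvPairwise (pre.length :: (pre.length + 1 + pre2.length)
              :: (pvIdx t3).map (· + (pre.length + 1 + pre2.length + 1)))
            = (pre.length, pre.length + 1 + pre2.length)
              :: pvPairwise ((pvIdx t3).map (· + (pre.length + 1 + pre2.length + 1))) from rfl]
          simp only [List.map_cons]
          rw [hhead1, hhead2]
        rw [hpeel, List.foldl_cons]

theorem pvBridgeA (output : String) :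
    parse_rmodel output
      = ((pvPairsFrom ((PySem.Str.splitlines output).map PySem.Str.strip)
          (pvIdx ((PySem.Str.splitlines output).map PySem.Str.strip))).foldl
          (fun d p => pvIns d p.1 p.2)
          (PySem.Dict.empty : PySem.Dict String (List String))).items := by
  unfold parse_rmodel
  dsimp only
  rw [pvIdx_enum _ 0,
    show (fun n : Nat => (0 : Int) + (n : Int)) = fun n : Nat => (n : Int) by funext n; ring,
    pvPairwise_map, List.foldl_map]
  unfold pvPairsFrom
  rw [List.foldl_map]
  congr 1
  apply List.foldl_ext
  intro d p _
  dsimp only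
  simp only [PySem.List.pyGetD_natCast]
  rw [show ((p.1 : Int) + 1) = (((p.1 + 1 : Nat)) : Int) by push_cast; ring,
    PySem.List.slice_natCast]
  cases hs : PySem.Str.split₀ (((PySem.Str.splitlines output).map PySem.Str.strip).getD p.1 "") with
  | nil => simp only [pvIns, hs]
  | cons a r =>
    cases r with
    | nil => simp only [pvIns, hs]
    | cons b r2 => cases r2 <;> simp only [pvIns, hs]

theorem pvBridgeB (output : String) :
    parse_rmodel_alt output
      = ((((PySem.Str.splitlines output).map PySem.Str.strip).foldl pvCore
          ((PySem.Dict.empty : PySem.Dict String (List String)), none)).1).items := by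
  unfold parse_rmodel_alt
  rw [List.foldl_map]
  rfl

-- ===== VERDICT (by name: the statement is the Claim_ definition above) =====
theorem parse_rmodel_spec : Claim_equal_parse_rmodel := by
  intro output _ _
  unfold Spec_parse_rmodel
  rw [pvBridgeA, pvBridgeB]
  exact congrArg _ (pvMain _ _ le_rfl _).symm
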